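-- pv_equiv track=rewrite | github.com/Yozpoz64/cycling-pollutant-exposure | gdb_viewer.py | get_binary_colours
-- ===== SOURCE A (Python) =====
-- def get_binary_colours(num_segments, c1, c2):
--     colours = []
--     for i in range(num_segments):
--         if i % 2 == 0:
--             colours.append(c1)
--         else:
--             colours.append(c2)
--     return colours
-- ===== SOURCE B (Python) =====
-- def get_binary_colours(num_segments, c1, c2):
--     return ([c1, c2] * ((num_segments + 1) // 2))[:num_segments]
-- ===== Notes on version B (the rewrite author's own statement) =====
-- stated objective: simpler
-- what changed: Replaces the per-index parity loop by building the repeated two-colour block once with list multiplication and truncating it to num_segments.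
import Mathlib
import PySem

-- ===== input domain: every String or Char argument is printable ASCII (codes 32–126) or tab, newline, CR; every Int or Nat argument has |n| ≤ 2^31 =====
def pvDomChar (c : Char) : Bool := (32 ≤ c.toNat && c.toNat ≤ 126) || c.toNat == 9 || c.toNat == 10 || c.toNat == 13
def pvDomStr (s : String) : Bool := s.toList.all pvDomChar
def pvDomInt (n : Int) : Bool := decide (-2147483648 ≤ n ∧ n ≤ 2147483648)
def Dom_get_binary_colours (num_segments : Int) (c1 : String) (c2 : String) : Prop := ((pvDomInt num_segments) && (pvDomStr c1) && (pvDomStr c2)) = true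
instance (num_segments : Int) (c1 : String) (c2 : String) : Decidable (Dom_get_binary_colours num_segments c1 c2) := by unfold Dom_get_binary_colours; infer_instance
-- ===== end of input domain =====

-- B builds the repeated two-colour block once and truncates it, instead of A's per-index parity branch (objective: simpler).

-- ===== PORT A =====
def get_binary_colours (num_segments : Int) (c1 : String) (c2 : String) : List String :=
  (PySem.List.pyRange 0 num_segments 1).foldl
    (fun colours i => if PySem.Int.mod i 2 == 0 then colours ++ [c1] else colours ++ [c2]) []

-- ===== PORT B =====
def get_binary_colours_alt (num_segments : Int) (c1 : String) (c2 : String) : List String :=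
  (List.flatten (List.replicate ((PySem.Int.floordiv (num_segments + 1) 2).toNat) [c1, c2])).take
    num_segments.toNat

-- ===== PRECONDITION & SPEC =====
def Spec_get_binary_colours (num_segments : Int) (c1 : String) (c2 : String) (out : List String) : Prop := out = get_binary_colours_alt num_segments c1 c2
instance (num_segments : Int) (c1 : String) (c2 : String) (out : List String) : Decidable (Spec_get_binary_colours num_segments c1 c2 out) := by unfold Spec_get_binary_colours; infer_instance

-- ===== CLAIM (what is proved, stated in full; the proofs are below) =====
def Claim_equal_get_binary_colours : Prop := ∀ (num_segments : Int) (c1 : String) (c2 : String), Dom_get_binary_colours num_segments c1 c2 → Spec_get_binary_colours num_segments c1 c2 (get_binary_colours num_segments c1 c2)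

-- ===== LEMMAS AND PROOFS =====

lemma flat_block_getElem? (c1 c2 : String) :
    ∀ (k j : ℕ), j < 2 * k →
      (List.flatten (List.replicate k [c1, c2]))[j]? = some (if j % 2 = 0 then c1 else c2) := by
  intro k
  induction k with
  | zero => intro j hj; omega
  | succ k ih =>
    intro j hj
    rw [List.replicate_succ, List.flatten_cons]
    match j with
    | 0 => simp
    | 1 => simp
    | j + 2 =>
      have h2 : j < 2 * k := by omega
      have := ih j h2
      simp only [List.getElem?_append_right (by simp : ([c1, c2] : List String).length ≤ j + 2)]
      simpa [Nat.add_mod] using this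

lemma take_flat_eq_map (c1 c2 : String) (m : ℕ) :
    (List.flatten (List.replicate ((m + 1) / 2) [c1, c2])).take m
      = (List.range m).map (fun j => if j % 2 = 0 then c1 else c2) := by
  apply List.ext_getElem?
  intro i
  rw [List.getElem?_take]
  by_cases hi : i < m
  · rw [if_pos hi, List.getElem?_map, List.getElem?_range hi,
      flat_block_getElem? c1 c2 _ i (by omega)]
    rfl
  · rw [if_neg hi, eq_comm, List.getElem?_eq_none_iff]
    simpa using Nat.le_of_not_lt hi

lemma parity_loop_eq_map (c1 c2 : String) (l : List Int) (acc : List String) :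
    l.foldl (fun colours i => if PySem.Int.mod i 2 == 0 then colours ++ [c1] else colours ++ [c2]) acc
      = acc ++ l.map (fun i => if PySem.Int.mod i 2 == 0 then c1 else c2) := by
  induction l generalizing acc with
  | nil => simp
  | cons x xs ih => simp only [List.foldl_cons, List.map_cons, ih]; split <;> simp

-- ===== VERDICT (by name: the statement is the Claim_ definition above) =====
theorem get_binary_colours_spec : Claim_equal_get_binary_colours := by
  intro n c1 c2 _
  show get_binary_colours n c1 c2 = get_binary_colours_alt n c1 c2
  unfold get_binary_colours get_binary_colours_alt
  by_cases hn : 0 ≤ n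
  · -- positive case
    obtain ⟨m, rfl⟩ := Int.eq_ofNat_of_zero_le hn
    rw [PySem.List.pyRange_one]
    have hcount : ((PySem.Int.floordiv ((m : Int) + 1) 2).toNat) = (m + 1) / 2 := by
      rw [PySem.Int.floordiv_eq_ediv_of_pos (by norm_num)]
      omega
    rw [hcount, Int.toNat_natCast, take_flat_eq_map]
    have : ((m : Int) - 0).toNat = m := by omega
    rw [this]
    rw [parity_loop_eq_map c1 c2 _ [], List.map_map, List.nil_append]
    apply List.map_congr_left
    intro j _
    have : PySem.Int.mod ((0 : Int) + j) 2 = ((j % 2 : ℕ) : Int) := by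
      rw [PySem.Int.mod_eq_emod_of_pos (by norm_num)]
      omega
    simp only [Function.comp_apply, this]
    by_cases h : j % 2 = 0 <;> simp [h]
    · intro hd; omega
  · -- negative: both sides are []
    have h1 : (n - 0).toNat = 0 := by omega
    have h2 : n.toNat = 0 := by omega
    rw [PySem.List.pyRange_one, h1, h2]
    simp
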